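-- pv_equiv track=rewrite | github.com/gabrielemongirdaite/advent_of_code_2023 | day18.py | define_perimeter
-- ===== SOURCE A (Python) =====
-- def define_perimeter(direction, length):
--     coordinates = [(0, 0)]
--     for ind, i in enumerate(direction):
--         starting_point = coordinates[-1]
--         for k in range(1, length[ind] + 1):
--             if i == 'U':
--                 coordinates.append((starting_point[0], starting_point[1] - k))
--             elif i == 'D':
--                 coordinates.append((starting_point[0], starting_point[1] + k))
--             elif i == 'L':
--                 coordinates.append((starting_point[0] - k, starting_point[1]))
--             else:
--                 coordinates.append((starting_point[0] + k, starting_point[1]))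
--     return coordinates
-- ===== SOURCE B (Python) =====
-- def define_perimeter(direction, length):
--     # Phase 1: expand each segment into unit step-vectors.
--     dmap = {'U': (0, -1), 'D': (0, 1), 'L': (-1, 0)}
--     deltas = [dmap.get(d, (1, 0)) for d, n in zip(direction, length) for _ in range(n)]
--     # Phase 2: accumulate the delta stream into running coordinates, seeded with (0, 0).
--     out = [(0, 0)]
--     x, y = 0, 0
--     for dx, dy in deltas:
--         x += dx
--         y += dy
--         out.append((x, y))
--     return out
-- ===== Notes on version B (the rewrite author's own statement) =====
-- stated objective: alternative
-- what changed: A recomputes each coordinate from the segment's starting point plus k in a nested index loop; B first expands the segments into a flat stream of unit step-vectors (zip + replicate) and then accumulates that stream with a running (x,y) sum seeded at (0,0).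
import Mathlib
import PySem

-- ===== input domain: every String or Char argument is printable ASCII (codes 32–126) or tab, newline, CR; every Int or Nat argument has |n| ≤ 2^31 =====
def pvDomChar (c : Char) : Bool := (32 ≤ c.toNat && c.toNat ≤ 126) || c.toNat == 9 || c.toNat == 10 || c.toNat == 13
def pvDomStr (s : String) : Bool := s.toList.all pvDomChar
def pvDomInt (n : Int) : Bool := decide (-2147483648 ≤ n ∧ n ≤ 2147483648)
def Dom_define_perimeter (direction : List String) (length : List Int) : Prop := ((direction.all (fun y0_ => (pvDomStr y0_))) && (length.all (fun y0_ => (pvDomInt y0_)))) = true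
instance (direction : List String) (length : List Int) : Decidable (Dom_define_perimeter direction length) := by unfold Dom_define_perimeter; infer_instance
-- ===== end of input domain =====

-- B replaces A's segment-start + k arithmetic by an expand-then-accumulate pipeline
-- (flat stream of unit step-vectors, then a running sum); same cost, different decomposition.

-- ===== PORT A =====
-- the if/elif/elif/else chain appending one point, as in A's inner loop body
def pvStepA (sp : Int × Int) (d : String) (k : Int) : Int × Int :=
  if d == "U" then (sp.1, sp.2 - k)
  else if d == "D" then (sp.1, sp.2 + k)
  else if d == "L" then (sp.1 - k, sp.2)
  else (sp.1 + k, sp.2)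

def define_perimeter (direction : List String) (length : List Int) : List (Int × Int) :=
  (PySem.List.enumerate direction 0).foldl
    (fun coordinates p =>
      let starting_point := PySem.List.pyGetD coordinates (-1) (0, 0)  -- coordinates[-1]; list is never empty
      let n := PySem.List.pyGetD length p.1 0  -- length[ind]; in range by Pre_
      (PySem.List.pyRange 1 (n + 1) 1).foldl
        (fun cs k => cs ++ [pvStepA starting_point p.2 k]) coordinates)
    [((0 : Int), (0 : Int))]

-- ===== PORT B =====
def pvDelta (d : String) : Int × Int :=
  if d == "U" then (0, -1)
  else if d == "D" then (0, 1)
  else if d == "L" then (-1, 0)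
  else (1, 0)

def define_perimeter_alt (direction : List String) (length : List Int) : List (Int × Int) :=
  let deltas := (direction.zip length).flatMap (fun p => List.replicate p.2.toNat (pvDelta p.1))
  (deltas.foldl
    (fun s q => (s.1 ++ [(s.2.1 + q.1, s.2.2 + q.2)], (s.2.1 + q.1, s.2.2 + q.2)))
    ([((0 : Int), (0 : Int))], ((0 : Int), (0 : Int)))).1

-- ===== PRECONDITION & SPEC =====
-- Pre_ excludes exactly the inputs where A raises IndexError (length shorter than direction).
def Pre_define_perimeter (direction : List String) (length : List Int) : Prop :=
  direction.length ≤ length.length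
instance (direction : List String) (length : List Int) : Decidable (Pre_define_perimeter direction length) := by unfold Pre_define_perimeter; infer_instance
def pvWitness_define_perimeter : List String × List Int := (["R", "U", "L"], [2, 1, 3])

def Spec_define_perimeter (direction : List String) (length : List Int) (out : List (Int × Int)) : Prop := out = define_perimeter_alt direction length
instance (direction : List String) (length : List Int) (out : List (Int × Int)) : Decidable (Spec_define_perimeter direction length out) := by unfold Spec_define_perimeter; infer_instance

-- ===== CLAIM (what is proved, stated in full; the proofs are below) =====
def Claim_equal_define_perimeter : Prop := ∀ (direction : List String) (length : List Int), Dom_define_perimeter direction length → Pre_define_perimeter direction length → Spec_define_perimeter direction length (define_perimeter direction length)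

-- ===== LEMMAS AND PROOFS =====

-- the point k unit steps in direction δ from sp
def pvPos (sp δ : Int × Int) (k : Int) : Int × Int := (sp.1 + k * δ.1, sp.2 + k * δ.2)

-- all perimeter points generated by a list of (direction, length) segments starting at sp
def pvSegs (sp : Int × Int) : List (String × Int) → List (Int × Int)
  | [] => []
  | (d, n) :: ps =>
      (List.range n.toNat).map (fun (k : Nat) => pvPos sp (pvDelta d) ((k : Int) + 1))
        ++ pvSegs (pvPos sp (pvDelta d) (n.toNat : Int)) ps

theorem pvStepA_eq_pos (sp : Int × Int) (d : String) (k : Int) :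
    pvStepA sp d k = pvPos sp (pvDelta d) k := by
  simp only [pvStepA, pvDelta, pvPos]
  split_ifs <;> simp <;> ring

theorem pvPos_pos (sp δ : Int × Int) (a b : Int) :
    pvPos (pvPos sp δ a) δ b = pvPos sp δ (a + b) := by
  simp only [pvPos, Prod.mk.injEq]; exact ⟨by ring, by ring⟩

theorem pvPos_zero (sp δ : Int × Int) : pvPos sp δ 0 = sp := by
  simp [pvPos]

-- B's inner accumulation over one expanded segment
theorem pvFoldB_replicate (m : Nat) (δ : Int × Int) :
    ∀ (out : List (Int × Int)) (sp : Int × Int),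
    (List.replicate m δ).foldl
        (fun s q => (s.1 ++ [(s.2.1 + q.1, s.2.2 + q.2)], (s.2.1 + q.1, s.2.2 + q.2))) (out, sp)
      = (out ++ (List.range m).map (fun (k : Nat) => pvPos sp δ ((k : Int) + 1)), pvPos sp δ (m : Int)) := by
  induction m with
  | zero => intro out sp; simp [pvPos_zero]
  | succ m ih =>
      intro out sp
      rw [List.replicate_succ, List.foldl_cons, ih]
      have hsp : ((sp.1 + δ.1, sp.2 + δ.2) : Int × Int) = pvPos sp δ 1 := by
        simp [pvPos]
      rw [hsp]
      have h1 : List.map (fun (k : Nat) => pvPos sp δ ((k : Int) + 1)) (List.range (m + 1))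
          = pvPos sp δ 1 :: List.map (fun (k : Nat) => pvPos (pvPos sp δ 1) δ ((k : Int) + 1)) (List.range m) := by
        rw [List.range_succ_eq_map, List.map_cons, List.map_map]
        congr 1
        · apply List.map_congr_left
          intro a _
          simp only [Function.comp_apply]
          rw [pvPos_pos]; congr 1; push_cast; ring
      have h2 : pvPos (pvPos sp δ 1) δ (m : Int) = pvPos sp δ ((m + 1 : Nat) : Int) := by
        rw [pvPos_pos]; congr 1; push_cast; ring
      rw [h1, h2]
      simp

-- B's whole fold over the flattened delta stream
theorem pvFoldB_segs (ps : List (String × Int)) :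
    ∀ (out : List (Int × Int)) (sp : Int × Int),
    ((ps.flatMap (fun p => List.replicate p.2.toNat (pvDelta p.1))).foldl
        (fun s q => (s.1 ++ [(s.2.1 + q.1, s.2.2 + q.2)], (s.2.1 + q.1, s.2.2 + q.2))) (out, sp)).1
      = out ++ pvSegs sp ps := by
  induction ps with
  | nil => intro out sp; simp [pvSegs]
  | cons p ps ih =>
      intro out sp
      obtain ⟨d, n⟩ := p
      rw [List.flatMap_cons, List.foldl_append, pvFoldB_replicate, ih, pvSegs, List.append_assoc]

-- A's inner loop over range(1, n+1) appends exactly one segment's points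
theorem pvFoldA_seg (sp : Int × Int) (d : String) (n : Int) (cs : List (Int × Int)) :
    (PySem.List.pyRange 1 (n + 1) 1).foldl (fun cs k => cs ++ [pvStepA sp d k]) cs
      = cs ++ (List.range n.toNat).map (fun (k : Nat) => pvPos sp (pvDelta d) ((k : Int) + 1)) := by
  rw [PySem.List.pyRange_one, PySem.List.foldl_append_singleton_eq_map, List.map_map]
  have hn : (n + 1 - 1).toNat = n.toNat := by omega
  rw [hn]
  congr 1
  apply List.map_congr_left; intro k _
  simp only [Function.comp_apply]
  rw [pvStepA_eq_pos]; congr 1; ring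

theorem pvGetLast?_segpoints (cs : List (Int × Int)) (sp : Int × Int) (δ : Int × Int) (m : Nat)
    (h : cs.getLast? = some sp) :
    (cs ++ (List.range m).map (fun (k : Nat) => pvPos sp δ ((k : Int) + 1))).getLast?
      = some (pvPos sp δ (m : Int)) := by
  cases m with
  | zero => simpa [pvPos_zero] using h
  | succ m =>
      rw [List.range_succ, List.map_append, List.map_singleton, ← List.append_assoc,
        List.getLast?_concat]
      norm_num

-- A's outer fold, tracking the running last point and the index into length
theorem pvFoldA_main (dir : List String) :
    ∀ (len : List Int) (s : Nat) (coords : List (Int × Int)) (sp : Int × Int),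
    s + dir.length ≤ len.length → coords.getLast? = some sp →
    ((PySem.List.enumerate dir (s : Int)).foldl
      (fun coordinates p =>
        let starting_point := PySem.List.pyGetD coordinates (-1) (0, 0)
        let n := PySem.List.pyGetD len p.1 0
        (PySem.List.pyRange 1 (n + 1) 1).foldl
          (fun cs k => cs ++ [pvStepA starting_point p.2 k]) coordinates)
      coords)
      = coords ++ pvSegs sp (dir.zip (len.drop s)) := by
  induction dir with
  | nil => intro len s coords sp _ _; simp [pvSegs]
  | cons d dir ih =>
      intro len s coords sp hlen hlast
      have hs : s < len.length := by simp at hlen; omega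
      have hne : coords ≠ [] := by
        intro hc; rw [hc] at hlast; simp at hlast
      rw [PySem.List.enumerate_cons, List.foldl_cons]
      simp only
      have h1 : PySem.List.pyGetD coords (-1) (0, 0) = sp := by
        rw [PySem.List.pyGetD_neg_one coords (0, 0) hne]
        rw [List.getLast?_eq_some_getLast hne] at hlast
        exact Option.some.inj hlast
      have h2 : PySem.List.pyGetD len (s : Int) 0 = len[s] :=
        PySem.List.pyGetD_natCast len s 0 |>.trans (by rw [List.getD_eq_getElem _ _ hs])
      rw [h1, h2, pvFoldA_seg]
      have hcast : ((s : Int) + 1) = ((s + 1 : Nat) : Int) := by push_cast; ring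
      rw [hcast, ih len (s + 1)
        (coords ++ (List.range (len[s]).toNat).map (fun (k : Nat) => pvPos sp (pvDelta d) ((k : Int) + 1)))
        (pvPos sp (pvDelta d) ((len[s]).toNat : Int))
        (by simp at hlen ⊢; omega)
        (pvGetLast?_segpoints coords sp (pvDelta d) (len[s]).toNat hlast)]
      have hdrop : len.drop s = len[s] :: len.drop (s + 1) := by
        rw [List.getElem_cons_drop]
      rw [hdrop, List.zip_cons_cons, pvSegs, List.append_assoc]

-- ===== VERDICT (by name: the statement is the Claim_ definition above) =====
theorem define_perimeter_spec : Claim_equal_define_perimeter := by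
  intro direction length _ hpre
  unfold Spec_define_perimeter define_perimeter define_perimeter_alt
  have hA := pvFoldA_main direction length 0 [((0:Int),(0:Int))] ((0:Int),(0:Int))
    (by simpa using hpre) (by simp)
  simp only [Nat.cast_zero] at hA
  rw [hA, List.drop_zero, pvFoldB_segs]
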